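-- pv_equiv track=rewrite | github.com/allen-proxmire/event-density | archive/research_history/ED Simulation/experiments/regime_map_2d.py | triad_statistics
-- ===== SOURCE A (Python) =====
-- def triad_statistics(modes: list) -> dict:
--     """Compute triad network summary."""
--     seeded_set = set(modes)
--     all_tgt = set()
--     n_triads = 0
--     for i, m in enumerate(modes):
--         for j, n in enumerate(modes):
--             if j <= i:
--                 continue
--             n_triads += 1
--             all_tgt.add(m + n)
--             all_tgt.add(abs(m - n))
--     novel = sorted(all_tgt - seeded_set)
--     return {
--         "n_triads": n_triads,
--         "forward_max": max(m + n for i, m in enumerate(modes)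
--                           for j, n in enumerate(modes) if j > i),
--         "inverse_min": min(abs(m - n) for i, m in enumerate(modes)
--                           for j, n in enumerate(modes) if j > i),
--         "n_novel_targets": len(novel),
--     }
-- ===== SOURCE B (Python) =====
-- def triad_statistics(modes: list) -> dict:
--     """Compute triad network summary (single pairwise pass + sort-based extremes)."""
--     if len(modes) < 2:
--         raise ValueError("triad_statistics needs at least two modes")
--     s = sorted(modes)
--     n = len(modes)
--     targets = set()
--     for i in range(n):
--         for j in range(i + 1, n):
--             targets.add(modes[i] + modes[j])
--             targets.add(abs(modes[i] - modes[j]))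
--     novel = targets - set(modes)
--     return {
--         "n_triads": n * (n - 1) // 2,
--         "forward_max": s[-1] + s[-2],
--         "inverse_min": min(s[k + 1] - s[k] for k in range(n - 1)),
--         "n_novel_targets": len(novel),
--     }
-- ===== Notes on version B (the rewrite author's own statement) =====
-- stated objective: alternative
-- what changed: B makes a single index-based pairwise pass to build the target set and replaces A's three separate pairwise scans: the triad count becomes the closed form n*(n-1)//2, forward_max becomes the sum of the two largest elements of a one-time sort, and inverse_min becomes the minimum adjacent gap of that sorted list.
import Mathlib
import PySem

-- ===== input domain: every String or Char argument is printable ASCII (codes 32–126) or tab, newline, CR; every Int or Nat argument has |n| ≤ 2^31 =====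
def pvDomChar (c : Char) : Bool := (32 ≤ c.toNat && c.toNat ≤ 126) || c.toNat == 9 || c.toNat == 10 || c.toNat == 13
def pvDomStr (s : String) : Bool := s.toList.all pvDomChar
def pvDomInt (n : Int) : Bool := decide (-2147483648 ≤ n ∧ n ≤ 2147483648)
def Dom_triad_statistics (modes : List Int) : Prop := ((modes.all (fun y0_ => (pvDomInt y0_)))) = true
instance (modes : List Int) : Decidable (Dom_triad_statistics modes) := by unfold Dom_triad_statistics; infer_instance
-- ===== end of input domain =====

-- B replaces A's three separate pairwise scans by one index-based pairwise pass plus a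
-- one-time sort: closed-form triad count, sum of the two largest for forward_max,
-- minimum adjacent sorted gap for inverse_min (objective: alternative).

-- ===== PORT A =====
def triad_statistics (modes : List Int) : List (String × Int) :=
  let seeded : PySem.Set Int := PySem.Set.ofList modes
  -- for i, m in enumerate(modes): for j, n in enumerate(modes): if j <= i: continue; …
  let st :=
    (PySem.List.enumerate modes).foldl
      (fun (acc : PySem.Set Int × Int) im =>
        (PySem.List.enumerate modes).foldl
          (fun (acc2 : PySem.Set Int × Int) jn =>
            if jn.1 ≤ im.1 then acc2
            else (PySem.Set.add (PySem.Set.add acc2.1 (im.2 + jn.2)) |im.2 - jn.2|, acc2.2 + 1))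
          acc)
      ((PySem.Set.empty : PySem.Set Int), (0 : Int))
  let novel := PySem.List.sorted (PySem.Set.diff st.1 seeded) (fun x => x) false
  let fwd := (PySem.List.enumerate modes).flatMap
      (fun im => ((PySem.List.enumerate modes).filter (fun jn => decide (im.1 < jn.1))).map
        (fun jn => im.2 + jn.2))
  let inv := (PySem.List.enumerate modes).flatMap
      (fun im => ((PySem.List.enumerate modes).filter (fun jn => decide (im.1 < jn.1))).map
        (fun jn => |im.2 - jn.2|))
  match PySem.List.max? fwd (fun x => x), PySem.List.min? inv (fun x => x) with
  | some fmax, some imin =>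
      [("n_triads", st.2), ("forward_max", fmax), ("inverse_min", imin),
       ("n_novel_targets", (novel.length : Int))]
  | _, _ => []   -- unreachable under Pre_ (Python raises ValueError from empty max())

-- ===== PORT B =====
def triad_statistics_alt (modes : List Int) : List (String × Int) :=
  if modes.length < 2 then []   -- Python: raise ValueError (outside Pre_)
  else
    let s := PySem.List.sorted modes (fun x => x) false
    let n : Int := (modes.length : Int)
    let targets :=
      (PySem.List.pyRange 0 n).foldl
        (fun (t : PySem.Set Int) i =>
          (PySem.List.pyRange (i + 1) n).foldl
            (fun (t2 : PySem.Set Int) j =>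
              PySem.Set.add
                (PySem.Set.add t2 (PySem.List.pyGetD modes i 0 + PySem.List.pyGetD modes j 0))
                |PySem.List.pyGetD modes i 0 - PySem.List.pyGetD modes j 0|)
            t)
        (PySem.Set.empty : PySem.Set Int)
    let novel := PySem.Set.diff targets (PySem.Set.ofList modes)
    match PySem.List.min? ((PySem.List.pyRange 0 (n - 1)).map
        (fun k => PySem.List.pyGetD s (k + 1) 0 - PySem.List.pyGetD s k 0)) (fun x => x) with
    | some imin =>
        [("n_triads", PySem.Int.floordiv (n * (n - 1)) 2),
         ("forward_max", PySem.List.pyGetD s (-1) 0 + PySem.List.pyGetD s (-2) 0),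
         ("inverse_min", imin),
         ("n_novel_targets", (novel.length : Int))]
    | none => []   -- unreachable: under the guard n - 1 ≥ 1, so the gap list is nonempty

-- ===== PRECONDITION & SPEC =====
-- Pre_ excludes lists with fewer than two modes, on which A raises ValueError (empty max()).
def Pre_triad_statistics (modes : List Int) : Prop := 2 ≤ modes.length
instance (modes : List Int) : Decidable (Pre_triad_statistics modes) := by
  unfold Pre_triad_statistics; infer_instance
def pvWitness_triad_statistics : List Int := [3, 5, 2]

def Spec_triad_statistics (modes : List Int) (out : List (String × Int)) : Prop := out = triad_statistics_alt modes
instance (modes : List Int) (out : List (String × Int)) : Decidable (Spec_triad_statistics modes out) := by unfold Spec_triad_statistics; infer_instance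

-- ===== CLAIM (what is proved, stated in full; the proofs are below) =====
def Claim_equal_triad_statistics : Prop := ∀ (modes : List Int), Dom_triad_statistics modes → Pre_triad_statistics modes → Spec_triad_statistics modes (triad_statistics modes)

-- ===== LEMMAS AND PROOFS =====

/-- The ordered list of index pairs i < j of `l`, as value pairs (l[i], l[j]),
in the traversal order both loops share. -/
def pvPairs : List Int → List (Int × Int)
  | [] => []
  | a :: t => (t.map (fun x => (a, x))) ++ pvPairs t

-- folding a function of the VALUE only over an enumerate is folding over the list
theorem pvFoldl_enumerate_snd {α σ : Type} (g : σ → α → σ) :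
    ∀ (t : List α) (s : Int) (acc : σ),
      (PySem.List.enumerate t s).foldl (fun a jn => g a jn.2) acc = t.foldl g acc := by
  intro t
  induction t with
  | nil => intro s acc; rfl
  | cons x xs ih => intro s acc; rw [PySem.List.enumerate_cons]; simp only [List.foldl_cons]; exact ih _ _

-- A's nested enumerate loop with the `j <= i: continue` skip is a fold over pvPairs
theorem pvFoldA {σ : Type} (f : σ → Int × Int → σ) :
    ∀ (l : List Int) (s : Int) (init : σ),
      (PySem.List.enumerate l s).foldl
        (fun acc im => (PySem.List.enumerate l s).foldl
          (fun acc2 jn => if jn.1 ≤ im.1 then acc2 else f acc2 (im.2, jn.2)) acc) init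
      = (pvPairs l).foldl f init := by
  intro l
  induction l with
  | nil => intro s init; rfl
  | cons a t ih =>
    intro s init
    rw [PySem.List.enumerate_cons]
    simp only [List.foldl_cons, le_refl, if_pos]
    have hidx : ∀ jn ∈ PySem.List.enumerate t (s + 1), s + 1 ≤ jn.1 := by
      intro jn hjn
      rcases (PySem.List.mem_enumerate_iff t (s+1) jn).1 hjn with ⟨k, hk, rfl⟩
      simp
    have h1 : (PySem.List.enumerate t (s + 1)).foldl
        (fun acc2 jn => if jn.1 ≤ s then acc2 else f acc2 (a, jn.2)) init
        = (t.map (fun x => (a, x))).foldl f init := by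
      rw [PySem.List.foldl_congr_mem _ _ (fun acc2 jn => f acc2 (a, jn.2)) init
        (by intro acc jn hjn; rw [if_neg (by have := hidx jn hjn; omega)])]
      rw [pvFoldl_enumerate_snd (fun acc x => f acc (a, x)) t (s+1) init, List.foldl_map]
    rw [h1]
    rw [PySem.List.foldl_congr_mem _ _
      (fun acc im => (PySem.List.enumerate t (s+1)).foldl
        (fun acc2 jn => if jn.1 ≤ im.1 then acc2 else f acc2 (im.2, jn.2)) acc) _
      (by intro acc im him
          rw [if_pos (by have := hidx im him; omega)])]
    rw [ih (s+1)]
    show _ = ((t.map fun x => (a, x)) ++ pvPairs t).foldl f init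
    rw [List.foldl_append]

-- A's pairwise generator expressions are maps over pvPairs
theorem pvGenA {β : Type} (g : Int × Int → β) :
    ∀ (l : List Int) (s : Int),
      (PySem.List.enumerate l s).flatMap
        (fun im => ((PySem.List.enumerate l s).filter (fun jn => decide (im.1 < jn.1))).map
          (fun jn => g (im.2, jn.2)))
      = (pvPairs l).map g := by
  intro l
  induction l with
  | nil => intro s; rfl
  | cons a t ih =>
    intro s
    rw [PySem.List.enumerate_cons]
    have hidx : ∀ jn ∈ PySem.List.enumerate t (s + 1), s + 1 ≤ jn.1 := by
      intro jn hjn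
      rcases (PySem.List.mem_enumerate_iff t (s+1) jn).1 hjn with ⟨k, hk, rfl⟩
      simp
    rw [List.flatMap_cons]
    have hfilt1 : (((s, a) :: PySem.List.enumerate t (s + 1)).filter
        (fun jn => decide (((s : Int), a).1 < jn.1))) = PySem.List.enumerate t (s + 1) := by
      rw [List.filter_cons]
      simp only [show decide (((s : Int), a).1 < ((s : Int), a).1) = false by simp]
      rw [List.filter_eq_self.2 (by intro jn hjn; have := hidx jn hjn; simp; omega)]
      simp
    rw [hfilt1]
    have hmap1 : (PySem.List.enumerate t (s + 1)).map (fun jn => g (((s : Int), a).2, jn.2))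
        = t.map (fun x => g (a, x)) := by
      have := PySem.List.map_snd_enumerate t (s + 1)
      calc (PySem.List.enumerate t (s + 1)).map (fun jn => g (a, jn.2))
          = ((PySem.List.enumerate t (s + 1)).map (fun x => x.2)).map (fun x => g (a, x)) := by
            rw [List.map_map]
            rfl
        _ = t.map (fun x => g (a, x)) := by rw [this]
    rw [hmap1]
    have hrest : (PySem.List.enumerate t (s + 1)).flatMap
        (fun im => (((s, a) :: PySem.List.enumerate t (s + 1)).filter
            (fun jn => decide (im.1 < jn.1))).map (fun jn => g (im.2, jn.2)))
        = (PySem.List.enumerate t (s + 1)).flatMap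
          (fun im => ((PySem.List.enumerate t (s + 1)).filter
            (fun jn => decide (im.1 < jn.1))).map (fun jn => g (im.2, jn.2))) := by
      unfold List.flatMap
      congr 1
      apply List.map_congr_left
      intro im him
      rw [List.filter_cons]
      simp only [show decide (im.1 < ((s : Int), a).1) = false by
        have := hidx im him; simp; omega]
      simp
    rw [hrest, ih (s+1)]
    show _ = ((t.map fun x => (a, x)) ++ pvPairs t).map g
    rw [List.map_append, List.map_map]
    rfl

-- B's nested index-range loop is the same fold over pvPairs
theorem pvFoldB {σ : Type} (f : σ → Int × Int → σ) (L : List Int) :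
    ∀ (m k : Nat) (init : σ), L.length - k = m → k ≤ L.length →
      (PySem.List.pyRange (k : Int) (L.length : Int)).foldl
        (fun acc i => (PySem.List.pyRange (i + 1) (L.length : Int)).foldl
          (fun acc2 j => f acc2 (PySem.List.pyGetD L i 0, PySem.List.pyGetD L j 0)) acc) init
      = (pvPairs (L.drop k)).foldl f init := by
  intro m
  induction m with
  | zero =>
    intro k init hm hk
    have hk' : k = L.length := by omega
    subst hk'
    rw [PySem.List.pyRange_one_eq_nil (by omega), List.drop_length]
    rfl
  | succ m ih =>
    intro k init hm hk
    have hklt : k < L.length := by omega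
    rw [PySem.List.pyRange_one_cons (by exact_mod_cast hklt)]
    simp only [List.foldl_cons]
    have hcast : ((k : Int) + 1) = ((k + 1 : Nat) : Int) := by push_cast; ring
    have hget : PySem.List.pyGetD L (k : Int) 0 = L[k] := by
      rw [PySem.List.pyGetD_natCast, List.getD_eq_getElem?_getD, List.getElem?_eq_getElem hklt]
      rfl
    have hinner : (PySem.List.pyRange ((k : Int) + 1) (L.length : Int)).foldl
        (fun acc2 j => f acc2 (PySem.List.pyGetD L (k : Int) 0, PySem.List.pyGetD L j 0)) init
        = (L.drop (k+1)).foldl (fun acc x => f acc (L[k], x)) init := by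
      rw [hget, hcast]
      have := PySem.List.foldl_pyRange_pyGetD' L 0
        (fun acc x => f acc (L[k], x)) init (a := ((k+1 : Nat) : Int)) (by positivity)
      rw [this]
      norm_num
    rw [hinner]
    have hdrop : L.drop k = L[k] :: L.drop (k+1) := List.drop_eq_getElem_cons hklt
    rw [hdrop]
    show _ = ((L.drop (k+1)).map (fun x => (L[k], x)) ++ pvPairs (L.drop (k+1))).foldl f _
    rw [List.foldl_append]
    simp only [List.foldl_map]
    rw [hcast, ih (k+1) _ (by omega) (by omega)]

theorem pvPairs_length_int (l : List Int) :
    ((pvPairs l).length : Int) * 2 = (l.length : Int) * ((l.length : Int) - 1) := by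
  induction l with
  | nil => rfl
  | cons a t ih =>
    simp only [pvPairs, List.length_append, List.length_map, List.length_cons]
    push_cast at *
    linear_combination ih

theorem pvPairs_getElem_mem (l : List Int) :
    ∀ (i j : Nat) (hij : i < j) (hj : j < l.length), (l[i], l[j]) ∈ pvPairs l := by
  induction l with
  | nil => intro i j hij hj; simp at hj
  | cons a t ih =>
    intro i j hij hj
    simp only [pvPairs, List.mem_append]
    cases i with
    | zero =>
      left
      simp only [List.getElem_cons_zero]
      have hj' : j - 1 < t.length := by simp at hj; omega
      have : (a :: t)[j] = t[j-1] := by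
        rw [List.getElem_cons]
        simp only [show ¬(j = 0) by omega]
        congr 1
      rw [this]
      exact List.mem_map.2 ⟨t[j-1], List.getElem_mem hj', rfl⟩
    | succ i' =>
      right
      have hj' : j - 1 < t.length := by simp at hj; omega
      have h1 : (a :: t)[i' + 1] = t[i'] := by simp
      have h2 : (a :: t)[j] = t[j-1] := by
        rw [List.getElem_cons]
        simp only [show ¬(j = 0) by omega]
        congr 1
      rw [h1, h2]
      exact ih i' (j-1) (by omega) hj'

theorem pvMem_pairs (l : List Int) (p : Int × Int) (hp : p ∈ pvPairs l) :
    ∃ (i j : Nat), ∃ (hij : i < j) (hj : j < l.length), p = (l[i], l[j]) := by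
  induction l with
  | nil => simp [pvPairs] at hp
  | cons a t ih =>
    simp only [pvPairs, List.mem_append, List.mem_map] at hp
    rcases hp with ⟨x, hx, rfl⟩ | hp
    · rcases List.getElem_of_mem hx with ⟨j', hj', rfl⟩
      exact ⟨0, j'+1, by omega, by simpa using by omega, by simp⟩
    · rcases ih hp with ⟨i, j, hij, hj, rfl⟩
      exact ⟨i+1, j+1, by omega, by simp; omega, by simp⟩

-- the multiset of g-images of the pairs only depends on the multiset of the list (g symmetric)
theorem pvMapPairs_perm (g : Int → Int → Int) (hg : ∀ a b, g a b = g b a) :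
    ∀ {l l' : List Int}, l.Perm l' →
      ((pvPairs l).map (fun p => g p.1 p.2)).Perm ((pvPairs l').map (fun p => g p.1 p.2)) := by
  intro l l' hperm
  induction hperm with
  | nil => exact List.Perm.refl _
  | cons x h ih =>
    simp only [pvPairs, List.map_append, List.map_map]
    exact List.Perm.append (List.Perm.map _ h) ih
  | swap x y l =>
    simp only [pvPairs, List.map_append, List.map_map, List.map_cons]
    rw [hg y x]
    exact (List.perm_append_comm_assoc _ _ _).cons _
  | trans h1 h2 ih1 ih2 => exact List.Perm.trans ih1 ih2

theorem pvMax?_id_eq_some {X : List Int} {v : Int} (hv : v ∈ X) (hb : ∀ y ∈ X, y ≤ v) :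
    PySem.List.max? X (fun x => x) = some v := by
  cases hX : PySem.List.max? X (fun x => x) with
  | none => rw [PySem.List.max?_eq_none_iff] at hX; subst hX; cases hv
  | some m =>
    have h1 := PySem.List.max?_mem hX
    have h2 := PySem.List.max?_isMax hX v hv
    have h3 := hb m h1
    simp only [Option.some_inj]
    omega

theorem pvMin?_id_eq_some {X : List Int} {v : Int} (hv : v ∈ X) (hb : ∀ y ∈ X, v ≤ y) :
    PySem.List.min? X (fun x => x) = some v := by
  cases hX : PySem.List.min? X (fun x => x) with
  | none => rw [PySem.List.min?_eq_none_iff] at hX; subst hX; cases hv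
  | some m =>
    have h1 := PySem.List.min?_mem hX
    have h2 := PySem.List.min?_isMin hX v hv
    have h3 := hb m h1
    simp only [Option.some_inj]
    omega

theorem pvGetD_neg (xs : List Int) (d : Int) (k : Nat) (h1 : 1 ≤ k) (h2 : k ≤ xs.length) :
    PySem.List.pyGetD xs (-(k : Int)) d = xs[xs.length - k]'(by omega) := by
  simp [PySem.List.pyGetD, PySem.List.pyGet?, PySem.List.pyIdx?]
  rw [if_neg (by omega), if_pos h2]
  simp [List.getElem?_eq_getElem (show xs.length - k < xs.length by omega)]

theorem pvMax_lemma (l : List Int) (hl : 2 ≤ l.length) :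
    PySem.List.max? ((pvPairs l).map (fun p => p.1 + p.2)) (fun x => x)
      = some ((PySem.List.sorted l (fun x => x) false)[l.length - 1]'(by
            rw [PySem.List.length_sorted]; omega)
          + (PySem.List.sorted l (fun x => x) false)[l.length - 2]'(by
            rw [PySem.List.length_sorted]; omega)) := by
  have hsl : (PySem.List.sorted l (fun x => x) false).length = l.length :=
    PySem.List.length_sorted l _ false
  have hperm : ((pvPairs (PySem.List.sorted l (fun x => x) false)).map
        (fun p => p.1 + p.2)).Perm ((pvPairs l).map (fun p => p.1 + p.2)) :=
    pvMapPairs_perm (fun a b => a + b) (fun a b => by ring)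
      (PySem.List.sorted_perm l (fun x => x) false)
  apply pvMax?_id_eq_some
  · apply hperm.mem_iff.1
    rw [Int.add_comm]
    exact List.mem_map_of_mem
      (pvPairs_getElem_mem _ (l.length - 2) (l.length - 1) (by omega) (by omega))
  · intro y hy
    have hy' := hperm.mem_iff.2 hy
    obtain ⟨p, hp2, rfl⟩ := List.mem_map.1 hy'
    obtain ⟨i, j, hij, hj, rfl⟩ := pvMem_pairs _ p hp2
    have m1 : (PySem.List.sorted l (fun x => x) false)[i]
        ≤ (PySem.List.sorted l (fun x => x) false)[l.length - 2]'(by omega) :=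
      PySem.List.sorted_id_getElem_mono l (by omega) (by omega)
    have m2 : (PySem.List.sorted l (fun x => x) false)[j]
        ≤ (PySem.List.sorted l (fun x => x) false)[l.length - 1]'(by omega) :=
      PySem.List.sorted_id_getElem_mono l (by omega) (by omega)
    simp only []
    omega

theorem pvMin_lemma (l : List Int) (hl : 2 ≤ l.length) :
    PySem.List.min? ((pvPairs l).map (fun p => |p.1 - p.2|)) (fun x => x)
      = PySem.List.min? ((PySem.List.pyRange 0 ((l.length : Int) - 1)).map
          (fun k => PySem.List.pyGetD (PySem.List.sorted l (fun x => x) false) (k + 1) 0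
                  - PySem.List.pyGetD (PySem.List.sorted l (fun x => x) false) k 0)) (fun x => x) := by
  have hsl : (PySem.List.sorted l (fun x => x) false).length = l.length :=
    PySem.List.length_sorted l _ false
  have hperm : ((pvPairs (PySem.List.sorted l (fun x => x) false)).map
        (fun p => |p.1 - p.2|)).Perm ((pvPairs l).map (fun p => |p.1 - p.2|)) :=
    pvMapPairs_perm (fun a b => |a - b|) (fun a b => abs_sub_comm a b)
      (PySem.List.sorted_perm l (fun x => x) false)
  have hglne : ((PySem.List.pyRange 0 ((l.length : Int) - 1)).map
      (fun k => PySem.List.pyGetD (PySem.List.sorted l (fun x => x) false) (k + 1) 0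
              - PySem.List.pyGetD (PySem.List.sorted l (fun x => x) false) k 0)) ≠ [] := by
    intro h
    have := congrArg List.length h
    rw [List.length_map, PySem.List.length_pyRange_one] at this
    simp at this
    omega
  cases hmin : PySem.List.min? ((PySem.List.pyRange 0 ((l.length : Int) - 1)).map
      (fun k => PySem.List.pyGetD (PySem.List.sorted l (fun x => x) false) (k + 1) 0
              - PySem.List.pyGetD (PySem.List.sorted l (fun x => x) false) k 0)) (fun x => x) with
  | none => exact absurd ((PySem.List.min?_eq_none_iff _ _).1 hmin) hglne
  | some gmin =>
    -- characterize gmin as an adjacent gap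
    have hmem := PySem.List.min?_mem hmin
    obtain ⟨k, hk, rfl⟩ := List.mem_map.1 hmem
    obtain ⟨hk0, hk1⟩ := PySem.List.mem_pyRange_one.mp hk
    have hkk : k = ((k.toNat : Nat) : Int) := (Int.toNat_of_nonneg hk0).symm
    have hknlt : k.toNat + 1 < (PySem.List.sorted l (fun x => x) false).length := by
      rw [hsl]; omega
    have hga : PySem.List.pyGetD (PySem.List.sorted l (fun x => x) false) k 0
        = (PySem.List.sorted l (fun x => x) false)[k.toNat]'(by omega) :=
      PySem.List.pyGetD_eq_getElem _ _ hk0 (by rw [hsl]; omega)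
    have hgb : PySem.List.pyGetD (PySem.List.sorted l (fun x => x) false) (k + 1) 0
        = (PySem.List.sorted l (fun x => x) false)[k.toNat + 1]'hknlt := by
      have := PySem.List.pyGetD_eq_getElem (PySem.List.sorted l (fun x => x) false)
        (i := k + 1) 0 (by omega) (by rw [hsl]; omega)
      rw [this]
      congr 1
      omega
    apply pvMin?_id_eq_some
    · apply hperm.mem_iff.1
      rw [hga, hgb]
      have hmono : (PySem.List.sorted l (fun x => x) false)[k.toNat]'(by omega)
          ≤ (PySem.List.sorted l (fun x => x) false)[k.toNat + 1]'hknlt :=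
        PySem.List.sorted_id_getElem_mono l (by omega) (by omega)
      have habs : |(PySem.List.sorted l (fun x => x) false)[k.toNat]'(by omega)
          - (PySem.List.sorted l (fun x => x) false)[k.toNat + 1]'hknlt|
          = (PySem.List.sorted l (fun x => x) false)[k.toNat + 1]'hknlt
            - (PySem.List.sorted l (fun x => x) false)[k.toNat]'(by omega) := by
        rw [abs_sub_comm, abs_of_nonneg (by omega)]
      rw [← habs]
      exact List.mem_map_of_mem (pvPairs_getElem_mem _ k.toNat (k.toNat + 1) (by omega) hknlt)
    · intro y hy
      have hy' := hperm.mem_iff.2 hy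
      obtain ⟨p, hp2, rfl⟩ := List.mem_map.1 hy'
      obtain ⟨i, j, hij, hj, rfl⟩ := pvMem_pairs _ p hp2
      have hjl : j < l.length := by omega
      have hi1 : (i : Int) ∈ PySem.List.pyRange 0 ((l.length : Int) - 1) := by
        rw [PySem.List.mem_pyRange_one]
        constructor
        · positivity
        · omega
      have hgap := PySem.List.min?_isMin hmin _ (List.mem_map_of_mem hi1)
      have hgi : PySem.List.pyGetD (PySem.List.sorted l (fun x => x) false) ((i : Int)) 0
          = (PySem.List.sorted l (fun x => x) false)[i]'(by omega) := by
        have := PySem.List.pyGetD_eq_getElem (PySem.List.sorted l (fun x => x) false)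
          (i := (i : Int)) 0 (by positivity) (by omega)
        rw [this]
        congr 1
      have hgi1 : PySem.List.pyGetD (PySem.List.sorted l (fun x => x) false) ((i : Int) + 1) 0
          = (PySem.List.sorted l (fun x => x) false)[i + 1]'(by omega) := by
        have := PySem.List.pyGetD_eq_getElem (PySem.List.sorted l (fun x => x) false)
          (i := (i : Int) + 1) 0 (by positivity) (by omega)
        rw [this]
        congr 1
      rw [hgi, hgi1] at hgap
      have hmono1 : (PySem.List.sorted l (fun x => x) false)[i]'(by omega)
          ≤ (PySem.List.sorted l (fun x => x) false)[j]'(by omega) :=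
        PySem.List.sorted_id_getElem_mono l (by omega) (by omega)
      have hmono2 : (PySem.List.sorted l (fun x => x) false)[i + 1]'(by omega)
          ≤ (PySem.List.sorted l (fun x => x) false)[j]'(by omega) :=
        PySem.List.sorted_id_getElem_mono l (by omega) (by omega)
      have habs : |(PySem.List.sorted l (fun x => x) false)[i]'(by omega)
          - (PySem.List.sorted l (fun x => x) false)[j]'(by omega)|
          = (PySem.List.sorted l (fun x => x) false)[j]'(by omega)
            - (PySem.List.sorted l (fun x => x) false)[i]'(by omega) := by
        rw [abs_sub_comm, abs_of_nonneg (by omega)]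
      simp only []
      rw [habs]
      omega

-- ===== VERDICT (by name: the statement is the Claim_ definition above) =====
theorem triad_statistics_spec : Claim_equal_triad_statistics := by
  intro modes hdom hpre
  unfold Spec_triad_statistics
  have hn : 2 ≤ modes.length := hpre
  simp only [triad_statistics, triad_statistics_alt]
  rw [if_neg (by omega)]
  -- A's generators are maps over pvPairs
  have hfwd : (PySem.List.enumerate modes).flatMap
      (fun im => ((PySem.List.enumerate modes).filter (fun jn => decide (im.1 < jn.1))).map
        (fun jn => im.2 + jn.2))
      = (pvPairs modes).map (fun p => p.1 + p.2) := pvGenA (fun p => p.1 + p.2) modes 0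
  have hinv : (PySem.List.enumerate modes).flatMap
      (fun im => ((PySem.List.enumerate modes).filter (fun jn => decide (im.1 < jn.1))).map
        (fun jn => |im.2 - jn.2|))
      = (pvPairs modes).map (fun p => |p.1 - p.2|) := pvGenA (fun p => |p.1 - p.2|) modes 0
  -- A's nested loop is a fold over pvPairs, split into its two accumulators
  have hst : (PySem.List.enumerate modes).foldl
      (fun (acc : PySem.Set Int × Int) im =>
        (PySem.List.enumerate modes).foldl
          (fun (acc2 : PySem.Set Int × Int) jn =>
            if jn.1 ≤ im.1 then acc2
            else (PySem.Set.add (PySem.Set.add acc2.1 (im.2 + jn.2)) |im.2 - jn.2|, acc2.2 + 1))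
          acc)
      ((PySem.Set.empty : PySem.Set Int), (0 : Int))
      = ((pvPairs modes).foldl
          (fun t p => PySem.Set.add (PySem.Set.add t (p.1 + p.2)) |p.1 - p.2|)
          (PySem.Set.empty : PySem.Set Int),
         (pvPairs modes).foldl (fun c (_ : Int × Int) => c + 1) (0 : Int)) :=
    (pvFoldA (fun acc p =>
        (PySem.Set.add (PySem.Set.add acc.1 (p.1 + p.2)) |p.1 - p.2|, acc.2 + 1)) modes 0
        ((PySem.Set.empty : PySem.Set Int), (0 : Int))).trans
      (PySem.List.foldl_prod_mk
        (fun t p => PySem.Set.add (PySem.Set.add t (p.1 + p.2)) |p.1 - p.2|)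
        (fun c (_ : Int × Int) => c + 1) (pvPairs modes) _ _)
  -- B's nested index loop is the same fold
  have htar : (PySem.List.pyRange 0 (modes.length : Int)).foldl
      (fun (t : PySem.Set Int) i =>
        (PySem.List.pyRange (i + 1) (modes.length : Int)).foldl
          (fun (t2 : PySem.Set Int) j =>
            PySem.Set.add
              (PySem.Set.add t2 (PySem.List.pyGetD modes i 0 + PySem.List.pyGetD modes j 0))
              |PySem.List.pyGetD modes i 0 - PySem.List.pyGetD modes j 0|)
          t)
      (PySem.Set.empty : PySem.Set Int)
      = (pvPairs modes).foldl
          (fun t p => PySem.Set.add (PySem.Set.add t (p.1 + p.2)) |p.1 - p.2|)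
          (PySem.Set.empty : PySem.Set Int) := by
    have h := pvFoldB
      (fun t p => PySem.Set.add (PySem.Set.add t (p.1 + p.2)) |p.1 - p.2|)
      modes modes.length 0 (PySem.Set.empty : PySem.Set Int) (by omega) (by omega)
    simpa using h
  -- the triangular count
  have hcount : (pvPairs modes).foldl (fun c (_ : Int × Int) => c + 1) (0 : Int)
      = ((pvPairs modes).length : Int) :=
    (PySem.List.foldl_add (pvPairs modes) (fun _ => (1 : Int)) 0).trans
      (by rw [PySem.List.sum_map_const_int]; ring)
  have hflo : PySem.Int.floordiv ((modes.length : Int) * ((modes.length : Int) - 1)) 2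
      = ((pvPairs modes).length : Int) := by
    rw [PySem.Int.floordiv_eq_ediv_of_pos (by norm_num), ← pvPairs_length_int modes,
      Int.mul_ediv_cancel _ (by norm_num)]
  -- the two negative indices into the sorted list
  have hneg1 : PySem.List.pyGetD (PySem.List.sorted modes (fun x => x) false) (-1) 0
      = (PySem.List.sorted modes (fun x => x) false)[modes.length - 1]'(by
          rw [PySem.List.length_sorted]; omega) := by
    have h := pvGetD_neg (PySem.List.sorted modes (fun x => x) false) 0 1 (by omega)
      (by rw [PySem.List.length_sorted]; omega)
    simp only [Nat.cast_one] at h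
    rw [h]
    congr 1
    rw [PySem.List.length_sorted]
  have hneg2 : PySem.List.pyGetD (PySem.List.sorted modes (fun x => x) false) (-2) 0
      = (PySem.List.sorted modes (fun x => x) false)[modes.length - 2]'(by
          rw [PySem.List.length_sorted]; omega) := by
    have h := pvGetD_neg (PySem.List.sorted modes (fun x => x) false) 0 2 (by omega)
      (by rw [PySem.List.length_sorted]; omega)
    simp only [Nat.cast_ofNat] at h
    rw [h]
    congr 1
    rw [PySem.List.length_sorted]
  rw [hfwd, hinv, hst, htar, pvMax_lemma modes hn, pvMin_lemma modes hn, hneg1, hneg2]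
  cases hmin : PySem.List.min? ((PySem.List.pyRange 0 ((modes.length : Int) - 1)).map
      (fun k => PySem.List.pyGetD (PySem.List.sorted modes (fun x => x) false) (k + 1) 0
              - PySem.List.pyGetD (PySem.List.sorted modes (fun x => x) false) k 0)) (fun x => x) with
  | none =>
    exfalso
    have := (PySem.List.min?_eq_none_iff _ _).1 hmin
    have hlen := congrArg List.length this
    rw [List.length_map, PySem.List.length_pyRange_one] at hlen
    simp at hlen
    omega
  | some gmin =>
    simp only [hcount, hflo, PySem.List.length_sorted]
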